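-- pv_equiv track=rewrite | github.com/vitid/CSCI561 | Assignment_1/board.py | probeBoard
-- ===== SOURCE A (Python) =====
-- EMPTY_CELL = '*'
--
-- def probeBoard(direction_i,direction_j,i,j,player,opponent_player,bs):
--     """
--     Supplement function to recursively collect a counter and check whether the position is valid or not
--
--     (direction_i,direction_j) indicates which direction to go
--     for example: (-1,-1) means diagonal left-up
--
--     return (#player,#opponent_player) collected so far
--
--     :param direction_i: -1/0/1
--     :param direction_j: -1/0/1
--     :param i:
--     :param j:
--     :param player:
--     :param opponent_player:
--     :param bs: Board State
--     :return: (#player,#opponent_player) collected so far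
--     """
--     if(i<0 or i>7 or j<0 or j>7):
--         return (0,0)
--     if(bs[i][j] == EMPTY_CELL):
--         return (0,0)
--     if(bs[i][j] == player):
--         return (1,0)
--     count_tuple = probeBoard(direction_i, direction_j, i + direction_i, j + direction_j, player, opponent_player, bs)
--     return (count_tuple[0],count_tuple[1]+1)
-- ===== SOURCE B (Python) =====
-- EMPTY_CELL = '*'
--
-- def probeBoard(direction_i, direction_j, i, j, player, opponent_player, bs):
--     # Classify each step of the ray with a terminator kind (False = edge/empty,
--     # True = player's piece, None = keep walking), search for the index of the
--     # first terminator, and build the answer from that kind and index.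
--     def terminator(k):
--         r = i + k * direction_i
--         c = j + k * direction_j
--         if r < 0 or r > 7 or c < 0 or c > 7:
--             return False
--         cell = bs[r][c]
--         if cell == EMPTY_CELL:
--             return False
--         if cell == player:
--             return True
--         return None
--
--     k = 0
--     t = terminator(0)
--     while t is None:
--         k += 1
--         t = terminator(k)
--     return (1 if t else 0, k)
-- ===== Notes on version B (the rewrite author's own statement) =====
-- stated objective: alternative
-- what changed: Instead of a recursion that threads the (player,opponent) pair through every call, B separates the problem into a step classifier (edge/empty, player piece, or continue) and a search for the index of the first terminating step, reconstructing the pair once from that kind and index.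
import Mathlib
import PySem

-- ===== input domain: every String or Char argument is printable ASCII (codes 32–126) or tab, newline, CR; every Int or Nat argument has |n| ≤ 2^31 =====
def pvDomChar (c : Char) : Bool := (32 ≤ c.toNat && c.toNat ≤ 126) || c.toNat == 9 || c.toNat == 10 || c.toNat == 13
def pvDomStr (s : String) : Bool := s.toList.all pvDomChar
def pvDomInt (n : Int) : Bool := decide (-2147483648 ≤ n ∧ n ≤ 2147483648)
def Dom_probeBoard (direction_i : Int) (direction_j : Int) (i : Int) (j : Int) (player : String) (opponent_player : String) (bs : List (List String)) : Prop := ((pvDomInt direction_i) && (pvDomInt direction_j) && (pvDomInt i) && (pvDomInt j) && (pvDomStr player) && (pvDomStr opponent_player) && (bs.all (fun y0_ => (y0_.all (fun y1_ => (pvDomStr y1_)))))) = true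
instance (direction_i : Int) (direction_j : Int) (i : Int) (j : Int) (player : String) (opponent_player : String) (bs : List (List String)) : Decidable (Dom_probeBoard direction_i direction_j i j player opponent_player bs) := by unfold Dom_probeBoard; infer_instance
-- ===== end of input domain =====

-- ===== PORT A =====
-- B decomposes the walk into a step classifier plus a first-terminator index
-- search (objective: alternative); return values agree wherever A returns normally.
-- Port of A: literal recursion; Nat fuel only makes it total (inside Pre_ the
-- guards fire within 9 calls, so the fuel branch is never reached there).
def probeBoardRec (direction_i : Int) (direction_j : Int) (player : String) (opponent_player : String) (bs : List (List String)) : Nat → Int → Int → Int × Int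
  | 0, _, _ => (0, 0)
  | Nat.succ fuel, i, j =>
    if i < 0 ∨ i > 7 ∨ j < 0 ∨ j > 7 then (0, 0)
    else
      match (PySem.List.pyGet? bs i).bind (fun row => PySem.List.pyGet? row j) with
      | none => (0, 0)  -- bs[i][j] raises IndexError in Python: excluded by Pre_
      | some cell =>
        if cell = "*" then (0, 0)
        else if cell = player then (1, 0)
        else
          let count_tuple := probeBoardRec direction_i direction_j player opponent_player bs fuel (i + direction_i) (j + direction_j)
          (count_tuple.1, count_tuple.2 + 1)

def probeBoard (direction_i : Int) (direction_j : Int) (i : Int) (j : Int) (player : String) (opponent_player : String) (bs : List (List String)) : Int × Int :=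
  probeBoardRec direction_i direction_j player opponent_player bs 16 i j

-- ===== PORT B =====
-- Port of B's `terminator(k)`: `some false` = edge/empty, `some true` = player's
-- piece, `none` = keep walking.
def pvTerminator (direction_i : Int) (direction_j : Int) (i : Int) (j : Int) (player : String) (bs : List (List String)) (k : Nat) : Option Bool :=
  let r := i + (k : Int) * direction_i
  let c := j + (k : Int) * direction_j
  if r < 0 ∨ r > 7 ∨ c < 0 ∨ c > 7 then some false
  else
    match (PySem.List.pyGet? bs r).bind (fun row => PySem.List.pyGet? row c) with
    | none => some false  -- bs[r][c] raises IndexError in Python: excluded by Pre_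
    | some cell =>
      if cell = "*" then some false
      else if cell = player then some true
      else none

-- Port of B's search loop: index (and kind) of the first terminating step;
-- Nat fuel only makes the unbounded Python while-loop total (never exhausted inside Pre_).
def pvFirstStop (t : Nat → Option Bool) : Nat → Nat → Bool × Nat
  | 0, k => (false, k)
  | Nat.succ fuel, k =>
    match t k with
    | some b => (b, k)
    | none => pvFirstStop t fuel (k + 1)

def probeBoard_alt (direction_i : Int) (direction_j : Int) (i : Int) (j : Int) (player : String) (opponent_player : String) (bs : List (List String)) : Int × Int :=
  let r := pvFirstStop (pvTerminator direction_i direction_j i j player bs) 16 0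
  (if r.1 then 1 else 0, (r.2 : Int))

-- ===== PRECONDITION & SPEC =====
def pvInRange (i : Int) (j : Int) : Bool := 0 ≤ i && i ≤ 7 && 0 ≤ j && j ≤ 7
def pvCellAt (bs : List (List String)) (i : Int) (j : Int) : Option String :=
  (PySem.List.pyGet? bs i).bind (fun row => PySem.List.pyGet? row j)
-- `pvWalkOn bs p m`: at step m of the ray the walk continues (cell in range,
-- present, and neither EMPTY_CELL nor the player's piece).
def pvWalkOn (bs : List (List String)) (player : String) (i : Int) (j : Int) (di : Int) (dj : Int) (m : Nat) : Bool :=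
  pvInRange (i + m * di) (j + m * dj) &&
    (match pvCellAt bs (i + m * di) (j + m * dj) with
     | none => false
     | some c => !(c == "*") && !(c == player))
-- Pre_ excludes exactly the inputs where Python A raises: an IndexError when the
-- walk reaches an in-range position whose cell is missing from bs, and a
-- RecursionError when direction (0,0) sits on a cell that never terminates the walk.
def Pre_probeBoard (direction_i : Int) (direction_j : Int) (i : Int) (j : Int) (player : String) (opponent_player : String) (bs : List (List String)) : Prop :=
  (∀ k ∈ List.range 9,
     (pvInRange (i + k * direction_i) (j + k * direction_j) = true ∧
      ∀ m ∈ List.range k, pvWalkOn bs player i j direction_i direction_j m = true) →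
     (pvCellAt bs (i + k * direction_i) (j + k * direction_j)).isSome) ∧
  (direction_i = 0 ∧ direction_j = 0 → pvWalkOn bs player i j direction_i direction_j 0 = false)
instance (direction_i : Int) (direction_j : Int) (i : Int) (j : Int) (player : String) (opponent_player : String) (bs : List (List String)) : Decidable (Pre_probeBoard direction_i direction_j i j player opponent_player bs) := by unfold Pre_probeBoard; infer_instance

def pvWitness_probeBoard : Int × Int × Int × Int × String × String × List (List String) :=
  (1, 1, 9, 9, "X", "O", [])

def Spec_probeBoard (direction_i : Int) (direction_j : Int) (i : Int) (j : Int) (player : String) (opponent_player : String) (bs : List (List String)) (out : Int × Int) : Prop := out = probeBoard_alt direction_i direction_j i j player opponent_player bs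
instance (direction_i : Int) (direction_j : Int) (i : Int) (j : Int) (player : String) (opponent_player : String) (bs : List (List String)) (out : Int × Int) : Decidable (Spec_probeBoard direction_i direction_j i j player opponent_player bs out) := by unfold Spec_probeBoard; infer_instance

-- ===== CLAIM (what is proved, stated in full; the proofs are below) =====
def Claim_equal_probeBoard : Prop := ∀ (direction_i : Int) (direction_j : Int) (i : Int) (j : Int) (player : String) (opponent_player : String) (bs : List (List String)), Dom_probeBoard direction_i direction_j i j player opponent_player bs → Pre_probeBoard direction_i direction_j i j player opponent_player bs → Spec_probeBoard direction_i direction_j i j player opponent_player bs (probeBoard direction_i direction_j i j player opponent_player bs)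

-- ===== LEMMAS AND PROOFS =====
-- Shifting the start index of the search by one.
lemma pvFirstStop_shift (t : Nat → Option Bool) :
    ∀ (fuel k : Nat),
      pvFirstStop t fuel (k + 1) =
      (fun r : Bool × Nat => (r.1, r.2 + 1)) (pvFirstStop (fun n => t (n + 1)) fuel k) := by
  intro fuel
  induction fuel with
  | zero => intro k; simp [pvFirstStop]
  | succ n ih =>
    intro k
    simp only [pvFirstStop]
    cases t (k + 1) with
    | some b => simp
    | none => exact ih (k + 1)

-- The classifier based at the next position is the classifier based at (i,j),
-- one step later.
lemma pvTerminator_shift (di dj i j : Int) (player : String) (bs : List (List String)) (k : Nat) :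
    pvTerminator di dj (i + di) (j + dj) player bs k =
    pvTerminator di dj i j player bs (k + 1) := by
  have hr : i + di + (k : Int) * di = i + ((k : Nat) + 1 : Nat) * di := by push_cast; ring
  have hc : j + dj + (k : Int) * dj = j + ((k : Nat) + 1 : Nat) * dj := by push_cast; ring
  simp only [pvTerminator, hr, hc]

-- Main bridge: A's recursion equals the classifier-search decomposition.
lemma probeBoardRec_eq_firstStop (di dj : Int) (player opponent_player : String) (bs : List (List String)) :
    ∀ (fuel : Nat) (i j : Int),
      probeBoardRec di dj player opponent_player bs fuel i j =
      (fun r : Bool × Nat => ((if r.1 then (1:Int) else 0), (r.2 : Int)))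
        (pvFirstStop (pvTerminator di dj i j player bs) fuel 0) := by
  intro fuel
  induction fuel with
  | zero => intro i j; simp [probeBoardRec, pvFirstStop]
  | succ n ih =>
    intro i j
    by_cases hb : i < 0 ∨ i > 7 ∨ j < 0 ∨ j > 7
    · have ht : pvTerminator di dj i j player bs 0 = some false := by
        simp [pvTerminator, hb]
      simp [probeBoardRec, pvFirstStop, ht, hb]
    · cases hcell : (PySem.List.pyGet? bs i).bind (fun row => PySem.List.pyGet? row j) with
      | none =>
        have ht : pvTerminator di dj i j player bs 0 = some false := by
          simp [pvTerminator, hb, hcell]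
        simp [probeBoardRec, pvFirstStop, ht, hb, hcell]
      | some cell =>
        by_cases h1 : cell = "*"
        · have ht : pvTerminator di dj i j player bs 0 = some false := by
            simp [pvTerminator, hb, hcell, h1]
          simp [probeBoardRec, pvFirstStop, ht, hb, hcell, h1]
        · by_cases h2 : cell = player
          · subst h2
            have ht : pvTerminator di dj i j cell bs 0 = some true := by
              simp [pvTerminator, hb, hcell, h1]
            simp [probeBoardRec, pvFirstStop, ht, hb, hcell, h1]
          · have ht : pvTerminator di dj i j player bs 0 = none := by
              simp [pvTerminator, hb, hcell, h1, h2]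
            have hrec : probeBoardRec di dj player opponent_player bs (n+1) i j =
                ((probeBoardRec di dj player opponent_player bs n (i+di) (j+dj)).1,
                 (probeBoardRec di dj player opponent_player bs n (i+di) (j+dj)).2 + 1) := by
              simp [probeBoardRec, hb, hcell, h1, h2]
            have hloop : pvFirstStop (pvTerminator di dj i j player bs) (n+1) 0 =
                pvFirstStop (pvTerminator di dj i j player bs) n 1 := by
              simp [pvFirstStop, ht]
            rw [hrec, ih (i+di) (j+dj), hloop, show (1:Nat) = 0+1 from rfl, pvFirstStop_shift]
            have hsh : (fun m => pvTerminator di dj i j player bs (m+1)) =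
                pvTerminator di dj (i+di) (j+dj) player bs := by
              funext m; rw [pvTerminator_shift]
            rw [hsh]
            simp

theorem pvWitness_sat :
    Dom_probeBoard pvWitness_probeBoard.1 pvWitness_probeBoard.2.1 pvWitness_probeBoard.2.2.1 pvWitness_probeBoard.2.2.2.1 pvWitness_probeBoard.2.2.2.2.1 pvWitness_probeBoard.2.2.2.2.2.1 pvWitness_probeBoard.2.2.2.2.2.2 ∧
    Pre_probeBoard pvWitness_probeBoard.1 pvWitness_probeBoard.2.1 pvWitness_probeBoard.2.2.1 pvWitness_probeBoard.2.2.2.1 pvWitness_probeBoard.2.2.2.2.1 pvWitness_probeBoard.2.2.2.2.2.1 pvWitness_probeBoard.2.2.2.2.2.2 := by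
  decide

-- ===== VERDICT (by name: the statement is the Claim_ definition above) =====
theorem probeBoard_spec : Claim_equal_probeBoard := by
  intro di dj i j player opp bs _ _
  unfold Spec_probeBoard probeBoard probeBoard_alt
  rw [probeBoardRec_eq_firstStop]
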